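-- pv_equiv track=rewrite | github.com/Hanseokhun98/Coding_Test | 23.08.05/연습문제1_임의의수버전.py | find_min_sums
-- ===== SOURCE A (Python) =====
-- from itertools import combinations
-- from copy import deepcopy
--
-- def find_min_sums(nums, prev_sum=0):
--     # Base case: only two numbers left in the list
--     if len(nums) == 2:
--         return [prev_sum + nums[0] + nums[1]]
--
--     sums = []
--     # Find all combinations of 2 numbers
--     for pair in combinations(nums, 2):
--         new_nums = deepcopy(nums)  # Make a copy of the list
--         new_nums.remove(pair[0])  # Remove the two numbers from the list
--         new_nums.remove(pair[1])
--         new_nums.append(sum(pair))  # Add the sum to the list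
--         # Recursive call with the new list and the updated sum
--         sums.extend(find_min_sums(new_nums, prev_sum + sum(pair)))
--     return sums
-- ===== SOURCE B (Python) =====
-- from itertools import combinations
--
-- def find_min_sums(nums, prev_sum=0):
--     # Explicit DFS stack instead of recursion; same preorder leaf output.
--     results = []
--     stack = [(list(nums), prev_sum)]
--     while stack:
--         cur, acc = stack.pop()
--         if len(cur) == 2:
--             results.append(acc + cur[0] + cur[1])
--             continue
--         children = []
--         for pair in combinations(cur, 2):
--             nn = list(cur)
--             nn.remove(pair[0])
--             nn.remove(pair[1])
--             nn.append(pair[0] + pair[1])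
--             children.append((nn, acc + pair[0] + pair[1]))
--         stack.extend(reversed(children))
--     return results
-- ===== Notes on version B (the rewrite author's own statement) =====
-- stated objective: alternative
-- what changed: The recursion over pair-merge orderings is replaced by an iterative DFS with an explicit stack of (list, accumulated-sum) work items, pushing children in reverse so leaves are emitted in A's exact preorder.
import Mathlib
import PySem

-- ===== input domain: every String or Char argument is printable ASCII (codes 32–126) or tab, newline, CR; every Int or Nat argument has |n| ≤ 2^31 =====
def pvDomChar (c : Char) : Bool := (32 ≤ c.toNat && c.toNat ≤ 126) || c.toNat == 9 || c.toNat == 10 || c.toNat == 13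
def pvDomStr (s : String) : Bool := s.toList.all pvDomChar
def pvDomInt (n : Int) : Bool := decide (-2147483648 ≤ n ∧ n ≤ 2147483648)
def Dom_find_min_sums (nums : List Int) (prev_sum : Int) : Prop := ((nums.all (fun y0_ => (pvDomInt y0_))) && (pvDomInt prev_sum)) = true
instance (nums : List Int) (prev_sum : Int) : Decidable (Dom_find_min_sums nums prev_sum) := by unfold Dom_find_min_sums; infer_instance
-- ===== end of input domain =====

-- B replaces A's recursion by an explicit DFS stack of (list, accumulated-sum) work items
-- producing the same preorder leaf output; objective: alternative decomposition, same cost.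

-- ===== PORT A =====
-- list.remove(v): ValueError is unreachable at every call site below (the removed values
-- come from a combination of the list), so getD never fires on an admitted input.
def pyRemove (xs : List Int) (v : Int) : List Int := (PySem.List.remove? xs v).getD xs

-- A's recursion, with fuel = nums.length (each recursive call is on a list one shorter,
-- so the fuel never runs out; the 0-fuel branch is unreachable except on [] where A also returns []).
def find_min_sums_go : Nat → List Int → Int → List Int
  | 0, _, _ => []
  | f + 1, nums, prev_sum =>
    if nums.length = 2 then
      [prev_sum + (PySem.List.pyGet? nums 0).getD 0 + (PySem.List.pyGet? nums 1).getD 0]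
    else
      (PySem.List.combinations nums 2).foldl
        (fun sums pair =>
          let a := (PySem.List.pyGet? pair 0).getD 0
          let b := (PySem.List.pyGet? pair 1).getD 0
          let new_nums := pyRemove (pyRemove nums a) b ++ [pair.sum]
          sums ++ find_min_sums_go f new_nums (prev_sum + pair.sum)) []

def find_min_sums (nums : List Int) (prev_sum : Int) : List Int :=
  find_min_sums_go nums.length nums prev_sum

-- ===== PORT B =====
-- Fuel for the while-loop: W n = total number of stack pops needed for a start list of length n.
def altW : Nat → Nat
  | 0 => 1
  | 1 => 1
  | 2 => 1
  | n + 3 => 1 + Nat.choose (n + 3) 2 * altW (n + 2)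

-- The stack is a Lean list with its head as the top (python pops from the end and pushes
-- the children reversed, which is exactly 'children ++ rest' here).
def altLoop : Nat → List (List Int × Int) → List Int → List Int
  | 0, _, results => results
  | _ + 1, [], results => results
  | f + 1, (cur, acc) :: rest, results =>
    if cur.length = 2 then
      altLoop f rest (results ++ [acc + (PySem.List.pyGet? cur 0).getD 0 + (PySem.List.pyGet? cur 1).getD 0])
    else
      altLoop f
        ((PySem.List.combinations cur 2).map (fun pair =>
          let a := (PySem.List.pyGet? pair 0).getD 0
          let b := (PySem.List.pyGet? pair 1).getD 0
          (pyRemove (pyRemove cur a) b ++ [pair.sum], acc + pair.sum)) ++ rest)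
        results

def find_min_sums_alt (nums : List Int) (prev_sum : Int) : List Int :=
  altLoop (altW nums.length) [(nums, prev_sum)] []

-- ===== PRECONDITION & SPEC =====
def Spec_find_min_sums (nums : List Int) (prev_sum : Int) (out : List Int) : Prop := out = find_min_sums_alt nums prev_sum
instance (nums : List Int) (prev_sum : Int) (out : List Int) : Decidable (Spec_find_min_sums nums prev_sum out) := by unfold Spec_find_min_sums; infer_instance

-- ===== CLAIM (what is proved, stated in full; the proofs are below) =====
def Claim_equal_find_min_sums : Prop := ∀ (nums : List Int) (prev_sum : Int), Dom_find_min_sums nums prev_sum → Spec_find_min_sums nums prev_sum (find_min_sums nums prev_sum)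

-- ===== LEMMAS AND PROOFS =====

-- the child list built from a pair, and the node function used in the flatMap view of A
def pvChild (xs : List Int) (pair : List Int) : List Int :=
  pyRemove (pyRemove xs ((PySem.List.pyGet? pair 0).getD 0)) ((PySem.List.pyGet? pair 1).getD 0) ++ [pair.sum]

theorem pvSublist_pair {a b : Int} {xs : List Int} (h : List.Sublist [a, b] xs) :
    a ∈ xs ∧ b ∈ xs.erase a := by
  induction xs with
  | nil => cases h
  | cons x t ih =>
    cases h with
    | cons _ h' =>
      obtain ⟨ha, hb⟩ := ih h'
      refine ⟨List.mem_cons_of_mem _ ha, ?_⟩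
      by_cases hx : x = a
      · subst hx
        simp only [List.erase_cons_head]
        exact List.mem_of_mem_erase hb
      · rw [List.erase_cons_tail (by simpa using hx)]
        exact List.mem_cons_of_mem _ hb
    | cons₂ _ h' =>
      refine ⟨List.mem_cons_self, ?_⟩
      simpa using h'.subset (List.mem_cons_self)

theorem pvMem_pair {c : List Int} {xs : List Int} (h : c ∈ PySem.List.combinations xs 2) :
    ∃ a b, c = [a, b] ∧ a ∈ xs ∧ b ∈ xs.erase a := by
  obtain ⟨hs, hl⟩ := (PySem.List.mem_combinations_iff xs 2 c).mp h
  match c, hl with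
  | [a, b], _ => exact ⟨a, b, rfl, pvSublist_pair hs⟩

theorem pvRemove_mem {xs : List Int} {v : Int} (h : v ∈ xs) : pyRemove xs v = xs.erase v := by
  rw [pyRemove, PySem.List.remove?_eq_some_erase (h := h)]; rfl

theorem pvChild_length {xs pair : List Int} (h : pair ∈ PySem.List.combinations xs 2) :
    (pvChild xs pair).length + 1 = xs.length := by
  obtain ⟨a, b, rfl, ha, hb⟩ := pvMem_pair h
  have h1 : pyRemove xs a = xs.erase a := pvRemove_mem ha
  have h2 : pyRemove (xs.erase a) b = (xs.erase a).erase b := pvRemove_mem hb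
  have l1 : (xs.erase a).length + 1 = xs.length := by
    have : 0 < xs.length := List.length_pos_of_mem ha
    rw [List.length_erase_of_mem ha]; omega
  have l2 : ((xs.erase a).erase b).length + 1 = (xs.erase a).length := by
    rw [List.length_erase_of_mem hb]
    have : 0 < (xs.erase a).length := List.length_pos_of_mem hb
    omega
  have g0 : (PySem.List.pyGet? [a, b] 0).getD 0 = a := by
    simp [PySem.List.pyGet?, PySem.List.pyIdx?]
  have g1 : (PySem.List.pyGet? [a, b] 1).getD 0 = b := by
    simp [PySem.List.pyGet?, PySem.List.pyIdx?]
  simp only [pvChild, g0, g1, h1, h2, List.length_append, List.length_cons, List.length_nil]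
  omega

theorem pvFlatMap_congr {α β : Type} {l : List α} {f g : α → List β}
    (h : ∀ a ∈ l, f a = g a) : l.flatMap f = l.flatMap g := by
  induction l with
  | nil => rfl
  | cons x t ih =>
    simp only [List.flatMap_cons]
    rw [h x (List.mem_cons_self), ih (fun a ha => h a (List.mem_cons_of_mem _ ha))]

theorem pvGo_unfold (f : Nat) (xs : List Int) (acc : Int) (h2 : xs.length ≠ 2) :
    find_min_sums_go (f + 1) xs acc =
      (PySem.List.combinations xs 2).flatMap
        (fun pair => find_min_sums_go f (pvChild xs pair) (acc + pair.sum)) := by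
  simp only [find_min_sums_go, if_neg h2]
  have := PySem.List.foldl_append_eq_flatMap
      (l := PySem.List.combinations xs 2)
      (g := fun pair => find_min_sums_go f (pvChild xs pair) (acc + pair.sum))
      (acc := ([] : List Int))
  simpa [pvChild] using this

-- A in flatMap form on non-base lists
theorem pvA_unfold (xs : List Int) (acc : Int) (h2 : xs.length ≠ 2) :
    find_min_sums xs acc =
      (PySem.List.combinations xs 2).flatMap
        (fun pair => find_min_sums (pvChild xs pair) (acc + pair.sum)) := by
  cases xs with
  | nil => simp [find_min_sums, find_min_sums_go, PySem.List.combinations_nil_succ]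
  | cons x t =>
    have h0 : find_min_sums (x :: t) acc = find_min_sums_go (t.length + 1) (x :: t) acc := rfl
    rw [h0, pvGo_unfold _ _ _ h2]
    apply pvFlatMap_congr
    intro pair hp
    have hl := pvChild_length (xs := x :: t) hp
    have hlen : (pvChild (x :: t) pair).length = t.length := by
      simp only [List.length_cons] at hl; omega
    unfold find_min_sums
    rw [hlen]

theorem pvComb2_length (xs : List Int) :
    (PySem.List.combinations xs 2).length = Nat.choose xs.length 2 := by
  induction xs with
  | nil => simp [PySem.List.combinations_nil_succ]
  | cons x t ih =>
    rw [PySem.List.combinations_cons_succ]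
    simp [PySem.List.combinations_one, ih, Nat.choose_succ_succ, Nat.choose_one_right]

theorem pvW_rec (n : Nat) (h : n ≠ 2) :
    Nat.choose n 2 * altW (n - 1) + 1 = altW n := by
  match n with
  | 0 => simp [altW]
  | 1 => simp [altW]
  | 2 => exact absurd rfl h
  | n + 3 => simp [altW]; omega

theorem pvSum_const {α : Type} (l : List α) (m : Nat) (f : α → Nat)
    (h : ∀ a ∈ l, f a = m) : (l.map f).sum = l.length * m := by
  induction l with
  | nil => simp
  | cons x t ih =>
    simp only [List.map_cons, List.sum_cons, List.length_cons,
      h x (List.mem_cons_self), ih (fun a ha => h a (List.mem_cons_of_mem _ ha))]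
    ring

def pvCost (stack : List (List Int × Int)) : Nat :=
  (stack.map (fun s => altW s.1.length)).sum

theorem pvW_pos (n : Nat) : 1 ≤ altW n := by
  match n with
  | 0 => simp [altW]
  | 1 => simp [altW]
  | 2 => simp [altW]
  | n + 3 => simp [altW]

theorem pvLoop_spec : ∀ (f : Nat) (stack : List (List Int × Int)) (res : List Int),
    pvCost stack ≤ f →
    altLoop f stack res = res ++ stack.flatMap (fun s => find_min_sums s.1 s.2) := by
  intro f
  induction f with
  | zero =>
    intro stack res h
    cases stack with
    | nil => simp [altLoop]
    | cons s rest =>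
      exfalso
      have := pvW_pos s.1.length
      simp [pvCost] at h
      omega
  | succ g ih =>
    intro stack res h
    cases stack with
    | nil => simp [altLoop]
    | cons s rest =>
      obtain ⟨cur, acc⟩ := s
      by_cases h2 : cur.length = 2
      · have hc : pvCost rest ≤ g := by
          simp only [pvCost, List.map_cons, List.sum_cons, h2, altW] at h ⊢
          omega
        simp only [altLoop, if_pos h2]
        rw [ih rest _ hc]
        have hF : find_min_sums cur acc =
            [acc + (PySem.List.pyGet? cur 0).getD 0 + (PySem.List.pyGet? cur 1).getD 0] := by
          unfold find_min_sums
          rw [h2]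
          simp [find_min_sums_go, h2]
        simp [hF]
      · have hchild : ∀ pair ∈ PySem.List.combinations cur 2,
            (pvChild cur pair).length = cur.length - 1 := by
          intro pair hp
          have := pvChild_length hp
          omega
        have hcost : pvCost ((PySem.List.combinations cur 2).map (fun pair =>
            (pyRemove (pyRemove cur ((PySem.List.pyGet? pair 0).getD 0))
              ((PySem.List.pyGet? pair 1).getD 0) ++ [pair.sum], acc + pair.sum)) ++ rest) ≤ g := by
          have hsum : ((PySem.List.combinations cur 2).map
              (fun pair => altW (pvChild cur pair).length)).sum
              = (PySem.List.combinations cur 2).length * altW (cur.length - 1) :=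
            pvSum_const _ _ _ (fun pair hp => by rw [hchild pair hp])
          have hW := pvW_rec cur.length h2
          simp only [pvCost, List.map_append, List.sum_append, List.map_map] at h ⊢
          have heq : ((PySem.List.combinations cur 2).map
              ((fun s => altW s.1.length) ∘ (fun pair =>
                (pyRemove (pyRemove cur ((PySem.List.pyGet? pair 0).getD 0))
                  ((PySem.List.pyGet? pair 1).getD 0) ++ [pair.sum], acc + pair.sum)))).sum
              = ((PySem.List.combinations cur 2).map
                (fun pair => altW (pvChild cur pair).length)).sum := by
            apply congrArg
            apply List.map_congr_left
            intro pair hp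
            rfl
          rw [heq, hsum, pvComb2_length] at *
          simp only [List.map_cons, List.sum_cons] at h
          omega
        simp only [altLoop, if_neg h2]
        rw [ih _ _ hcost]
        have hA := pvA_unfold cur acc h2
        simp only [pvChild] at hA
        simp only [List.flatMap_append, List.flatMap_map, List.flatMap_cons]
        rw [← hA]

-- ===== VERDICT (by name: the statement is the Claim_ definition above) =====
theorem find_min_sums_spec : Claim_equal_find_min_sums := by
  intro nums prev_sum _
  unfold Spec_find_min_sums find_min_sums_alt
  rw [pvLoop_spec (altW nums.length) [(nums, prev_sum)] [] (by simp [pvCost])]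
  simp
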